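-- pv_equiv track=rewrite | github.com/juanvpa/Shark.Attacks_First.Proyect | SRC/cleaning_functions.py | hour
-- ===== SOURCE A (Python) =====
-- def hour (x):
--
--     """
--     THIS FUNCTION WILL HELP US TO RETURN ONLY THE CATEGORY OF THE DAY (SUNRISE, MORNING, NOON, AFTERNOON, EVENING, NIGHT)
--     BY DOING THIS, WE WILL GET THE HOUR OF THE DAY
--     """
--
--     horarios = {
--         'Sunrise': ['04', '05', '06', '07'],
--         'Morning': ['08', '09','10','11'],
--         'Noon': ['12', '13', '14', '15'],
--         'Afternoon': ['16', '17', '18','19'],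
--         'Evening' : ['20', '21', '22','23'],
--         'Night' : ['00', '01', '02','03']}
--
--     for key, values in horarios.items():
--
--         if x[0:2] in values:
--             return key
--
--     return x
-- ===== SOURCE B (Python) =====
-- def hour(x):
--     s = x[0:2]
--     if len(s) == 2 and all('0' <= c <= '9' for c in s):
--         h = int(s)
--         if h <= 23:
--             return ["Night", "Sunrise", "Morning", "Noon", "Afternoon", "Evening"][h // 4]
--     return x
-- ===== Notes on version B (the rewrite author's own statement) =====
-- stated objective: simpler
-- what changed: Replaces A's linear scan over a dict of six hard-coded four-string hour lists by a closed-form arithmetic classification: check the two-character prefix is ASCII digits, parse it, and index a fixed six-entry category table by h // 4, keeping A's fall-through return of x.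
import Mathlib
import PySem

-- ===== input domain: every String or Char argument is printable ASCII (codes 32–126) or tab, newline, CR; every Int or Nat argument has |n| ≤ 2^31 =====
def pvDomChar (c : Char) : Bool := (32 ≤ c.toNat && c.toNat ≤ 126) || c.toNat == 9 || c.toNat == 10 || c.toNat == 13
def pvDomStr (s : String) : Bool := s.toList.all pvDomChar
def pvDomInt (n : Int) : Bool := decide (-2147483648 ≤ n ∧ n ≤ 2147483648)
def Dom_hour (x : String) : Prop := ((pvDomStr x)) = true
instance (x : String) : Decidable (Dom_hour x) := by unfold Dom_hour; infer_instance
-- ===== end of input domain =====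

-- B replaces A's scan over six hard-coded four-element lists of hour strings by a closed-form
-- arithmetic classification (parse the two-digit ASCII prefix, index a fixed table by h // 4); objective: simpler.

-- ===== PORT A =====
-- the dict 'horarios' in insertion order
def hourHorarios : List (String × List String) :=
  [("Sunrise", ["04", "05", "06", "07"]),
   ("Morning", ["08", "09", "10", "11"]),
   ("Noon", ["12", "13", "14", "15"]),
   ("Afternoon", ["16", "17", "18", "19"]),
   ("Evening", ["20", "21", "22", "23"]),
   ("Night", ["00", "01", "02", "03"])]

-- the 'for key, values in horarios.items()' loop with its early return; falls through to x
def hourGo (x s : String) : List (String × List String) → String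
  | [] => x
  | (k, vs) :: rest => if s ∈ vs then k else hourGo x s rest

def hour (x : String) : String :=
  hourGo x (PySem.Str.slice x (some 0) (some 2)) hourHorarios

-- ===== PORT B =====
def hourCats : List String := ["Night", "Sunrise", "Morning", "Noon", "Afternoon", "Evening"]

def hour_alt (x : String) : String :=
  let s := PySem.Str.slice x (some 0) (some 2)
  -- len(s) == 2 and all('0' <= c <= '9' for c in s)
  if s.toList.length == 2 && s.toList.all (fun c => decide ('0' ≤ c) && decide (c ≤ '9')) then
    match PySem.Int.ofStr? s with   -- h = int(s); never none under the digit guard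
    | some h =>
        if h ≤ 23 then
          -- the list index [h // 4]; in range under the guards, so getD's default is never used
          (PySem.List.pyGet? hourCats (PySem.Int.floordiv h 4)).getD x
        else x
    | none => x
  else x

-- ===== PRECONDITION & SPEC =====
def Spec_hour (x : String) (out : String) : Prop := out = hour_alt x
instance (x : String) (out : String) : Decidable (Spec_hour x out) := by unfold Spec_hour; infer_instance

-- ===== CLAIM (what is proved, stated in full; the proofs are below) =====
def Claim_equal_hour : Prop := ∀ (x : String), Dom_hour x → Spec_hour x (hour x)

-- ===== LEMMAS AND PROOFS =====
set_option maxRecDepth 8192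

theorem digit_enum (c : Char) (h1 : '0' ≤ c) (h2 : c ≤ '9') :
    c ∈ ['0', '1', '2', '3', '4', '5', '6', '7', '8', '9'] := by
  have h1' : 48 ≤ c.toNat := UInt32.le_iff_toNat_le.mp ((Char.le_def).mp h1)
  have h2' : c.toNat ≤ 57 := UInt32.le_iff_toNat_le.mp ((Char.le_def).mp h2)
  have hval : c = Char.ofNat c.toNat := by
    apply Char.ext
    simp [Char.ofNat_toNat]
  interval_cases h : c.toNat <;> rw [hval] <;> decide

-- A's loop as an Option-valued first-match scan (proof helper)
def hourScan (s : String) : List (String × List String) → Option String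
  | [] => none
  | (k, vs) :: rest => if s ∈ vs then some k else hourScan s rest

theorem hourGo_eq (x s : String) (l : List (String × List String)) :
    hourGo x s l = (hourScan s l).getD x := by
  induction l with
  | nil => rfl
  | cons p rest ih =>
      obtain ⟨k, vs⟩ := p
      by_cases h : s ∈ vs <;> simp [hourGo, hourScan, h, ih]

-- B's branch as an Option-valued core depending only on the prefix (proof helper)
def hourAltCore (s : String) : Option String :=
  if s.toList.length == 2 && s.toList.all (fun c => decide ('0' ≤ c) && decide (c ≤ '9')) then
    match PySem.Int.ofStr? s with
    | some h => if h ≤ 23 then PySem.List.pyGet? hourCats (PySem.Int.floordiv h 4) else none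
    | none => none
  else none

theorem alt_eq (x : String) :
    hour_alt x = (hourAltCore (PySem.Str.slice x (some 0) (some 2))).getD x := by
  simp only [hour_alt, hourAltCore]
  by_cases hg : ((PySem.Str.slice x (some 0) (some 2)).toList.length == 2 &&
      (PySem.Str.slice x (some 0) (some 2)).toList.all
        (fun c => decide ('0' ≤ c) && decide (c ≤ '9'))) = true
  · rw [if_pos hg, if_pos hg]
    cases hof : PySem.Int.ofStr? (PySem.Str.slice x (some 0) (some 2)) with
    | none => simp
    | some hh =>
        by_cases h23 : hh ≤ 23 <;> simp [h23]
  · rw [if_neg hg, if_neg hg]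
    simp

theorem core_eq (s : String) : hourScan s hourHorarios = hourAltCore s := by
  by_cases hg : (s.toList.length == 2 &&
      s.toList.all (fun c => decide ('0' ≤ c) && decide (c ≤ '9'))) = true
  · have hg' : s.toList.length = 2 ∧ ∀ c ∈ s.toList, '0' ≤ c ∧ c ≤ '9' := by
      simpa using hg
    obtain ⟨c1, c2, hl⟩ := List.length_eq_two.mp hg'.1
    have m1 := digit_enum c1 (hg'.2 c1 (by rw [hl]; simp)).1 (hg'.2 c1 (by rw [hl]; simp)).2
    have m2 := digit_enum c2 (hg'.2 c2 (by rw [hl]; simp)).1 (hg'.2 c2 (by rw [hl]; simp)).2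
    fin_cases m1 <;> fin_cases m2 <;>
      (rw [show s = String.ofList s.toList from (String.ofList_toList (s := s)).symm, hl]; decide)
  · have hnm : ∀ L : List String,
        (L.all (fun u => u.toList.length == 2 &&
          u.toList.all (fun c => decide ('0' ≤ c) && decide (c ≤ '9')))) = true → s ∉ L := by
      intro L hL hm
      exact hg (List.all_eq_true.mp hL s hm)
    have n1 := hnm ["04", "05", "06", "07"] (by decide)
    have n2 := hnm ["08", "09", "10", "11"] (by decide)
    have n3 := hnm ["12", "13", "14", "15"] (by decide)
    have n4 := hnm ["16", "17", "18", "19"] (by decide)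
    have n5 := hnm ["20", "21", "22", "23"] (by decide)
    have n6 := hnm ["00", "01", "02", "03"] (by decide)
    rw [hourAltCore, if_neg hg]
    simp [hourScan, hourHorarios, n1, n2, n3, n4, n5, n6]

theorem hour_eq_alt (x : String) : hour x = hour_alt x := by
  rw [hour, hourGo_eq, core_eq, alt_eq]

-- ===== VERDICT (by name: the statement is the Claim_ definition above) =====
theorem hour_spec : Claim_equal_hour := by
  intro x _
  unfold Spec_hour
  exact hour_eq_alt x
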